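-- pv_equiv track=rewrite | github.com/Mschikay/leetcode | google/google5.py | check
-- ===== SOURCE A (Python) =====
-- def check(document, dictionary):
--     trie = {}
--     for word in dictionary:
--         wordDict = trie
--         for w in word:
--             curr = wordDict.setdefault(w, {})
--             wordDict = curr
--
--     res = []
--     for dd in document:
--         wordDict = trie
--         for d in dd:
--             curr = wordDict.get(d, None)
--             if curr is None:
--                 res.append(dd)
--                 break
--             wordDict = curr
--     return res
-- ===== SOURCE B (Python) =====
-- def check(document, dictionary):
--     # a word passes iff it is a (nonempty-or-empty) prefix of some dictionary word;
--     # the empty word always passes (it is the root path of the trie).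
--     return [dd for dd in document
--             if dd and not any(w.startswith(dd) for w in dictionary)]
-- ===== Notes on version B (the rewrite author's own statement) =====
-- stated objective: simpler
-- what changed: Dropped the explicit trie construction and walk; B filters the document directly, testing each nonempty word with any(w.startswith(dd) for w in dictionary).
import Mathlib
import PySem

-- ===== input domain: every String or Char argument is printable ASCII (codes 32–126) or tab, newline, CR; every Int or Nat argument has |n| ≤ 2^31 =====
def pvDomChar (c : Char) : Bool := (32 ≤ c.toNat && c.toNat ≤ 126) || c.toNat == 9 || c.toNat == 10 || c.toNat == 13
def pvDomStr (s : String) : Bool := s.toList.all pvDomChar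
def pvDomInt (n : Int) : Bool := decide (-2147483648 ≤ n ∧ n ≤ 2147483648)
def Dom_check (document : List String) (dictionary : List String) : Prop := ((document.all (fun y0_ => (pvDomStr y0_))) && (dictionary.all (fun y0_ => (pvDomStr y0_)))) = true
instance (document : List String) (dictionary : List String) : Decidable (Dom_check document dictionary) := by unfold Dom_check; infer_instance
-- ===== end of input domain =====

-- B drops the trie and filters the document with a direct prefix test; equivalence proved on all inputs.

-- ===== PORT A =====
-- Python's dict-of-dicts trie, encoded as an insertion-ordered assoc structure
-- (cons key child rest); get = first match, setdefault appends a fresh {} at the end.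
inductive Trie where
  | nil : Trie
  | cons : Char → Trie → Trie → Trie
deriving DecidableEq, Repr

def trieGet : Trie → Char → Option Trie
  | .nil, _ => none
  | .cons c child rest, d => if c = d then some child else trieGet rest d

-- the inner 'for w in word: wordDict = wordDict.setdefault(w, {})' loop of A
def trieInsert : Trie → List Char → Trie
  | t, [] => t
  | .nil, c :: cs => .cons c (trieInsert .nil cs) .nil
  | .cons a child rest, c :: cs =>
      if a = c then .cons a (trieInsert child cs) rest
      else .cons a child (trieInsert rest (c :: cs))
termination_by t cs => (cs.length, sizeOf t)

-- the inner document loop: true iff the walk breaks (dd gets appended)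
def walkFails : Trie → List Char → Bool
  | _, [] => false
  | t, c :: cs =>
      match trieGet t c with
      | none => true
      | some child => walkFails child cs

def check (document : List String) (dictionary : List String) : List String :=
  let trie := dictionary.foldl (fun t word => trieInsert t word.toList) Trie.nil
  document.foldl (fun res dd => if walkFails trie dd.toList then res ++ [dd] else res) []

-- ===== PORT B =====
def check_alt (document : List String) (dictionary : List String) : List String :=
  document.filter (fun dd =>
    decide (dd ≠ "") && !(dictionary.any (fun w => PySem.Str.startswith w dd)))

-- ===== PRECONDITION & SPEC =====
def Spec_check (document : List String) (dictionary : List String) (out : List String) : Prop := out = check_alt document dictionary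
instance (document : List String) (dictionary : List String) (out : List String) : Decidable (Spec_check document dictionary out) := by unfold Spec_check; infer_instance

-- ===== CLAIM (what is proved, stated in full; the proofs are below) =====
def Claim_equal_check : Prop := ∀ (document : List String) (dictionary : List String), Dom_check document dictionary → Spec_check document dictionary (check document dictionary)

-- ===== LEMMAS AND PROOFS =====

lemma walkFails_nil_iff (cs : List Char) : walkFails Trie.nil cs = false ↔ cs = [] := by
  cases cs <;> simp [walkFails, trieGet]

lemma trieGet_insert (t : Trie) (c : Char) (cs : List Char) (d : Char) :
    trieGet (trieInsert t (c :: cs)) d =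
      if d = c then some (trieInsert ((trieGet t c).getD .nil) cs) else trieGet t d := by
  induction t with
  | nil =>
      simp only [trieInsert, trieGet, Option.getD_none]
      by_cases h : c = d
      · subst h; simp
      · rw [if_neg h, if_neg (Ne.symm h)]
  | cons a child rest ih_child ih_rest =>
      by_cases hac : a = c
      · subst hac
        by_cases h : a = d
        · subst h
          simp [trieInsert, trieGet]
        · simp [trieInsert, trieGet, h, Ne.symm h]
      · by_cases had : a = d
        · subst had
          simp [trieInsert, trieGet, hac]
        · simp [trieInsert, trieGet, hac, had, ih_rest]

lemma walkFails_insert (cs : List Char) (t : Trie) (w : List Char) :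
    walkFails (trieInsert t w) cs = false ↔ (walkFails t cs = false ∨ cs <+: w) := by
  induction cs generalizing t w with
  | nil => simp [walkFails]
  | cons d cs' ih =>
      cases w with
      | nil => simp [trieInsert]
      | cons c w' =>
          simp only [walkFails, trieGet_insert]
          by_cases hdc : d = c
          · subst hdc
            rw [if_pos rfl]
            cases hres : trieGet t d with
            | none =>
                simp only [Option.getD_none, ih, walkFails_nil_iff]
                constructor
                · rintro (rfl | h)
                  · exact Or.inr (List.cons_prefix_cons.mpr ⟨rfl, List.nil_prefix⟩)
                  · exact Or.inr (List.cons_prefix_cons.mpr ⟨rfl, h⟩)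
                · rintro (h | h)
                  · simp at h
                  · exact Or.inr ((List.cons_prefix_cons.mp h).2)
            | some child =>
                simp only [Option.getD_some, ih]
                constructor
                · rintro (h | h)
                  · exact Or.inl h
                  · exact Or.inr (List.cons_prefix_cons.mpr ⟨rfl, h⟩)
                · rintro (h | h)
                  · exact Or.inl h
                  · exact Or.inr ((List.cons_prefix_cons.mp h).2)
          · rw [if_neg hdc]
            have hnp : ¬ (d :: cs' <+: c :: w') := fun h => hdc (List.cons_prefix_cons.mp h).1
            simp [hnp]

lemma walkFails_foldl (cs : List Char) (ws : List String) (t : Trie) :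
    walkFails (ws.foldl (fun t word => trieInsert t word.toList) t) cs = false ↔
      (walkFails t cs = false ∨ ∃ w ∈ ws, cs <+: w.toList) := by
  induction ws generalizing t with
  | nil => simp
  | cons w ws' ih =>
      simp only [List.foldl_cons, ih, walkFails_insert]
      constructor
      · rintro ((h | h) | ⟨u, hu, hp⟩)
        · exact Or.inl h
        · exact Or.inr ⟨w, by simp, h⟩
        · exact Or.inr ⟨u, by simp [hu], hp⟩
      · rintro (h | ⟨u, hu, hp⟩)
        · exact Or.inl (Or.inl h)
        · rcases List.mem_cons.mp hu with rfl | hu'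
          · exact Or.inl (Or.inr hp)
          · exact Or.inr ⟨u, hu', hp⟩

lemma walkFails_root (dictionary : List String) (dd : String) :
    walkFails (dictionary.foldl (fun t word => trieInsert t word.toList) Trie.nil) dd.toList
      = (decide (dd ≠ "") && !(dictionary.any (fun w => PySem.Str.startswith w dd))) := by
  rcases hb : walkFails (dictionary.foldl (fun t word => trieInsert t word.toList) Trie.nil) dd.toList with _ | _
  · have h := (walkFails_foldl dd.toList dictionary Trie.nil).mp hb
    rw [walkFails_nil_iff] at h
    rw [hb]
    symm
    simp only [Bool.and_eq_false_iff]
    rcases h with h | ⟨w, hw, hp⟩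
    · left
      have : dd = "" := by simp_all
      simp [this]
    · right
      simp only [Bool.not_eq_false', List.any_eq_true]
      exact ⟨w, hw, by simp [PySem.Chars.startswith_iff, hp]⟩
  · rw [hb]
    symm
    simp only [Bool.and_eq_true, decide_eq_true_iff, Bool.not_eq_true', List.any_eq_false]
    constructor
    · intro h
      subst h
      simp only [String.toList_empty] at hb
      have := (walkFails_foldl [] dictionary Trie.nil).mpr (Or.inl rfl)
      rw [hb] at this
      exact (Bool.true_eq_false.mp this).elim
    · intro w hw
      rcases hcase : PySem.Str.startswith w dd with _ | _
      · simp
      · exfalso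
        rw [PySem.Str.startswith_eq, PySem.Chars.startswith_iff] at hcase
        have := (walkFails_foldl dd.toList dictionary Trie.nil).mpr (Or.inr ⟨w, hw, hcase⟩)
        rw [hb] at this
        exact Bool.true_eq_false.mp this

-- ===== VERDICT (by name: the statement is the Claim_ definition above) =====
theorem check_spec : Claim_equal_check := by
  intro document dictionary _
  unfold Spec_check check check_alt
  rw [PySem.List.foldl_append_if_eq_filter]
  simp only [List.nil_append]
  congr 1
  funext dd
  exact walkFails_root dictionary dd
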